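-- pv_equiv track=rewrite | github.com/felipervm/comp2152_labs | Week06/lab06_starter_windows.py | parse_mac_address
-- ===== SOURCE A (Python) =====
-- def parse_mac_address(output):
--     lines = output.strip().split("\n")
--     info = {"mac": "Not found", "ip": "Not found"}
--
--     for line in lines:
--         line = line.strip()
--         if "Physical Address" in line and ":" in line:
--             mac = line.split(":")[1].strip()
--             if mac and info["mac"] == "Not found":
--                 info["mac"] = mac
--         if "IPv4 Address" in line and ":" in line:
--             ip = line.split(":")[-1].strip()
--             ip = ip.replace("(Preferred)", "").strip()
--             if ip and info["ip"] == "Not found":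
--                 info["ip"] = ip
--
--     return info
-- ===== SOURCE B (Python) =====
-- def parse_mac_address(output):
--     lines = [line.strip() for line in output.strip().split("\n")]
--
--     def first_value(label, extract):
--         for line in lines:
--             if label in line and ":" in line:
--                 value = extract(line.split(":"))
--                 if value:
--                     return value
--         return "Not found"
--
--     mac = first_value("Physical Address", lambda parts: parts[1].strip())
--     ip = first_value("IPv4 Address",
--                      lambda parts: parts[-1].strip().replace("(Preferred)", "").strip())
--     return {"mac": mac, "ip": ip}
-- ===== Notes on version B (the rewrite author's own statement) =====
-- stated objective: simpler
-- what changed: Replaces A's single stateful pass mutating a sentinel-gated dict with two independent declarative first-non-empty-match passes (one per field) through one shared early-returning helper; Pre_ excludes inputs where a matching line's extracted value is literally the string 'Not found', a corner where that value collides with the default and A keeps a later line's value while B keeps the first, either choice being defensible.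
import Mathlib
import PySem

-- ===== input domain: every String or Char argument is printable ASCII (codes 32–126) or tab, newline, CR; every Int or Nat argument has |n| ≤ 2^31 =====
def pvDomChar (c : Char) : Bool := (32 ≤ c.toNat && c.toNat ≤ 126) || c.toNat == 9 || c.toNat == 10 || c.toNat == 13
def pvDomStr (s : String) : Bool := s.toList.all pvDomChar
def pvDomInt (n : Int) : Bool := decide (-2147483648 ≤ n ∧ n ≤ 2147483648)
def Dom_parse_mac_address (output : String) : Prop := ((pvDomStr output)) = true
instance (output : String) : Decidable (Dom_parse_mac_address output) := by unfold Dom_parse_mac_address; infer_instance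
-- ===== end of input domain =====

-- B replaces A's single stateful loop over a mutable dict by two declarative first-match
-- passes (one per field) through a shared helper; objective: simpler, same cost.

-- ===== PORT A =====
-- the loop body of A's 'for line in lines', named so the lemmas below can speak about it
def pvStepA (info : PySem.Dict String String) (line : String) : PySem.Dict String String :=
  let line := PySem.Str.strip line
  let info :=
    if PySem.Str.isIn "Physical Address" line && PySem.Str.isIn ":" line then
      -- line.split(":")[1]: ':' ∈ line guarantees at least two parts, so index 1 is in range
      let mac := PySem.Str.strip ((PySem.List.pyGet? ((PySem.Str.split? line ":").getD []) 1).getD "")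
      if mac != "" && info.getD "mac" "" == "Not found" then info.insert "mac" mac else info
    else info
  if PySem.Str.isIn "IPv4 Address" line && PySem.Str.isIn ":" line then
    -- line.split(":")[-1]: the split list is never empty, so index -1 is in range
    let ip := PySem.Str.strip ((PySem.List.pyGet? ((PySem.Str.split? line ":").getD []) (-1)).getD "")
    let ip := PySem.Str.strip (PySem.Str.replace ip "(Preferred)" "")
    if ip != "" && info.getD "ip" "" == "Not found" then info.insert "ip" ip else info
  else info

def parse_mac_address (output : String) : List (String × String) :=
  -- output.strip().split("\n"): separator "\n" ≠ "", so split? is always some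
  let lines := (PySem.Str.split? (PySem.Str.strip output) "\n").getD []
  let info : PySem.Dict String String :=
    (PySem.Dict.empty.insert "mac" "Not found").insert "ip" "Not found"
  (lines.foldl pvStepA info).items

-- ===== PORT B =====
-- the two extraction lambdas of Source B, named
def pvMacExtract (parts : List String) : String :=
  PySem.Str.strip ((PySem.List.pyGet? parts 1).getD "")   -- parts[1]: in range under the ':' guard
def pvIpExtract (parts : List String) : String :=
  PySem.Str.strip (PySem.Str.replace
    (PySem.Str.strip ((PySem.List.pyGet? parts (-1)).getD "")) "(Preferred)" "")  -- parts[-1]: list never empty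

-- Source B's 'first_value': first line matching the label with a non-empty extracted value
def pvFirstValue (label : String) (extract : List String → String) : List String → String
  | [] => "Not found"
  | line :: rest =>
    if PySem.Str.isIn label line && PySem.Str.isIn ":" line then
      let value := extract ((PySem.Str.split? line ":").getD [])   -- ':' guard: split? is some
      if value != "" then value
      else pvFirstValue label extract rest
    else pvFirstValue label extract rest

def parse_mac_address_alt (output : String) : List (String × String) :=
  let lines := ((PySem.Str.split? (PySem.Str.strip output) "\n").getD []).map PySem.Str.strip
  let mac := pvFirstValue "Physical Address" pvMacExtract lines
  let ip := pvFirstValue "IPv4 Address" pvIpExtract lines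
  [("mac", mac), ("ip", ip)]

-- ===== PRECONDITION & SPEC =====
-- true iff this line, when it matches the label, does not carry the extracted value "Not found"
def pvLineOk (label : String) (ex : List String → String) (l : String) : Bool :=
  let l := PySem.Str.strip l
  if PySem.Str.isIn label l && PySem.Str.isIn ":" l then
    ex ((PySem.Str.split? l ":").getD []) != "Not found"
  else true

-- Pre_ excludes inputs where some matching line's extracted field value is literally the string
-- "Not found": that value collides with the default, so A keeps the last such line's value while
-- B keeps the first, and no specification would prefer either tie-break on that corner.
def Pre_parse_mac_address (output : String) : Prop :=
  (((PySem.Str.split? (PySem.Str.strip output) "\n").getD []).all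
    (fun l => pvLineOk "Physical Address" pvMacExtract l &&
              pvLineOk "IPv4 Address" pvIpExtract l)) = true
instance (output : String) : Decidable (Pre_parse_mac_address output) := by
  unfold Pre_parse_mac_address; infer_instance

def pvWitness_parse_mac_address : String :=
  "Physical Address. : AA-BB\nIPv4 Address. : 1.2.3.4(Preferred)"

def Spec_parse_mac_address (output : String) (out : List (String × String)) : Prop := out = parse_mac_address_alt output
instance (output : String) (out : List (String × String)) : Decidable (Spec_parse_mac_address output out) := by unfold Spec_parse_mac_address; infer_instance

-- ===== CLAIM (what is proved, stated in full; the proofs are below) =====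
def Claim_equal_parse_mac_address : Prop := ∀ (output : String), Dom_parse_mac_address output → Pre_parse_mac_address output → Spec_parse_mac_address output (parse_mac_address output)

-- ===== LEMMAS AND PROOFS =====

-- the two-field dict state A's loop maintains
def pvMkD (m i : String) : PySem.Dict String String := ⟨[("mac", m), ("ip", i)]⟩

-- per-line candidate value (empty string = this line contributes nothing)
def pvCand (label : String) (extract : List String → String) (l : String) : String :=
  if PySem.Str.isIn label l && PySem.Str.isIn ":" l then extract ((PySem.Str.split? l ":").getD [])
  else ""

-- A's field update: take the candidate iff it is non-empty and the slot still holds the sentinel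
def pvUpd (cur cand : String) : String :=
  if cand != "" && cur == "Not found" then cand else cur

lemma pvIns_mac (m i v : String) : (pvMkD m i).insert "mac" v = pvMkD v i := rfl
lemma pvIns_ip' (m i v : String) : (PySem.Dict.insert ⟨[("mac", m), ("ip", i)]⟩ "ip" v) = (⟨[("mac", m), ("ip", v)]⟩ : PySem.Dict String String) := rfl
lemma pvGetD_mac (m i : String) : (pvMkD m i).getD "mac" "" = m := rfl
lemma pvGetD_ip (m i : String) : (pvMkD m i).getD "ip" "" = i := rfl
lemma pvGetD_ip' (m i : String) : (PySem.Dict.getD ⟨[("mac", m), ("ip", i)]⟩ "ip" "") = i := rfl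

lemma pvStepA_mk (m i l : String) :
    pvStepA (pvMkD m i) l =
      pvMkD (pvUpd m (pvCand "Physical Address" pvMacExtract (PySem.Str.strip l)))
            (pvUpd i (pvCand "IPv4 Address" pvIpExtract (PySem.Str.strip l))) := by
  have key : ∀ (m i L : String),
      (let info :=
        if PySem.Str.isIn "Physical Address" L && PySem.Str.isIn ":" L then
          let mac := PySem.Str.strip ((PySem.List.pyGet? ((PySem.Str.split? L ":").getD []) 1).getD "")
          if mac != "" && (pvMkD m i).getD "mac" "" == "Not found" then (pvMkD m i).insert "mac" mac else pvMkD m i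
        else pvMkD m i
      if PySem.Str.isIn "IPv4 Address" L && PySem.Str.isIn ":" L then
        let ip := PySem.Str.strip ((PySem.List.pyGet? ((PySem.Str.split? L ":").getD []) (-1)).getD "")
        let ip := PySem.Str.strip (PySem.Str.replace ip "(Preferred)" "")
        if ip != "" && info.getD "ip" "" == "Not found" then info.insert "ip" ip else info
      else info) =
      pvMkD (pvUpd m (pvCand "Physical Address" pvMacExtract L))
            (pvUpd i (pvCand "IPv4 Address" pvIpExtract L)) := by
    intro m i L
    by_cases h1 : (PySem.Str.isIn "Physical Address" L && PySem.Str.isIn ":" L) = true <;>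
    by_cases h2 : (PySem.Str.isIn "IPv4 Address" L && PySem.Str.isIn ":" L) = true <;>
      simp only [pvCand, pvUpd, pvMacExtract, pvIpExtract, h1, h2, if_true, if_false,
        Bool.false_eq_true, pvGetD_mac, pvGetD_ip, pvIns_mac] <;>
      split_ifs <;>
      simp_all [pvMkD, pvIns_ip', pvGetD_ip']
  exact key m i (PySem.Str.strip l)

lemma pvFoldA (ls : List String) : ∀ m i : String,
    (ls.foldl pvStepA (pvMkD m i)).items =
      [("mac", ls.foldl (fun c l => pvUpd c (pvCand "Physical Address" pvMacExtract (PySem.Str.strip l))) m),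
       ("ip",  ls.foldl (fun c l => pvUpd c (pvCand "IPv4 Address" pvIpExtract (PySem.Str.strip l))) i)] := by
  induction ls with
  | nil => intro m i; rfl
  | cons l r ih =>
    intro m i
    simp only [List.foldl, pvStepA_mk]
    exact ih _ _

lemma pvUpd_stay (c : String) (h : c ≠ "Not found") (x : String) : pvUpd c x = c := by
  simp [pvUpd, h]

lemma pvFold_stay (ls : List String) (c : String) (h : c ≠ "Not found") (f : String → String) :
    ls.foldl (fun c l => pvUpd c (f l)) c = c := by
  induction ls with
  | nil => rfl
  | cons l r ih => simp only [List.foldl]; rw [pvUpd_stay c h]; exact ih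

lemma pvUpd_nf (v : String) : pvUpd "Not found" v = if v = "" then "Not found" else v := by
  by_cases h : v = ""
  · simp [pvUpd, h]
  · simp [pvUpd, h]

lemma pvFirst_eq (label : String) (ex : List String → String) (ls : List String)
    (hok : ∀ l ∈ ls, pvLineOk label ex l = true) :
    ls.foldl (fun c l => pvUpd c (pvCand label ex (PySem.Str.strip l))) "Not found" =
      pvFirstValue label ex (ls.map PySem.Str.strip) := by
  induction ls with
  | nil => rfl
  | cons l r ih =>
    have hokl := hok l (List.mem_cons_self ..)
    have ihr := ih (fun x hx => hok x (List.mem_cons_of_mem _ hx))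
    simp only [List.foldl, List.map, pvFirstValue]
    by_cases h1 : (PySem.Str.isIn label (PySem.Str.strip l) && PySem.Str.isIn ":" (PySem.Str.strip l)) = true
    · rw [if_pos h1]
      have hc : pvCand label ex (PySem.Str.strip l) = ex ((PySem.Str.split? (PySem.Str.strip l) ":").getD []) := by
        rw [pvCand, if_pos h1]
      have hnf : ex ((PySem.Str.split? (PySem.Str.strip l) ":").getD []) ≠ "Not found" := by
        unfold pvLineOk at hokl
        simp only [h1, if_true, ne_eq, bne_iff_ne] at hokl
        exact hokl
      rw [hc, pvUpd_nf]
      by_cases h2 : ex ((PySem.Str.split? (PySem.Str.strip l) ":").getD []) = ""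
      · rw [if_pos h2]
        have : (ex ((PySem.Str.split? (PySem.Str.strip l) ":").getD []) != "") = false := by simp [h2]
        simp only [this, Bool.false_eq_true, if_false]
        exact ihr
      · rw [if_neg h2]
        have : (ex ((PySem.Str.split? (PySem.Str.strip l) ":").getD []) != "") = true := by simp [h2]
        simp only [this, if_true]
        exact pvFold_stay r _ hnf _
    · rw [if_neg h1]
      have hc : pvCand label ex (PySem.Str.strip l) = "" := by
        rw [pvCand, if_neg h1]
      rw [hc, pvUpd_nf, if_pos rfl]
      exact ihr

-- ===== VERDICT (by name: the statement is the Claim_ definition above) =====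
theorem parse_mac_address_spec : Claim_equal_parse_mac_address := by
  intro output _ hpre
  unfold Pre_parse_mac_address at hpre
  rw [List.all_eq_true] at hpre
  unfold Spec_parse_mac_address parse_mac_address parse_mac_address_alt
  have hinit : (PySem.Dict.empty.insert "mac" "Not found").insert "ip" "Not found"
      = pvMkD "Not found" "Not found" := rfl
  rw [hinit, pvFoldA,
    pvFirst_eq _ _ _ (fun l hl => (Bool.and_eq_true ..|>.mp (hpre l hl)).1),
    pvFirst_eq _ _ _ (fun l hl => (Bool.and_eq_true ..|>.mp (hpre l hl)).2)]
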